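-- pv_equiv track=rewrite | github.com/zayeemvt/TTYD-Partner-Attack-Scaling-Graphs | damage_calculator.py | calculate_damage
-- ===== SOURCE A (Python) =====
-- def calculate_damage(base_attack: int, atk_modifier: int, num_hits: int, falloff: bool=True) -> int:
--
--     if (num_hits < 3 or not falloff):
--         total_damage = (base_attack + atk_modifier) * num_hits
--         total_damage = 0 if (total_damage < 0) else total_damage
--
--         return total_damage
--
--     else:
--         total_damage = 0
--
--         for i in range(num_hits):
--             initial_hit = base_attack + atk_modifier
--
--             # If the initial hit does at least 1 damage, then every
--             # subsequent hit will also deal at least 1 damage.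
--             # Otherwise, no damage is dealt at all.
--             if (initial_hit <= 0):
--                 break
--             else:
--                 damage_dealt = initial_hit - i
--
--                 if damage_dealt <= 0:
--                     damage_dealt = 1
--
--                 total_damage += damage_dealt
--
--         return total_damage
-- ===== SOURCE B (Python) =====
-- def calculate_damage(base_attack: int, atk_modifier: int, num_hits: int, falloff: bool=True) -> int:
--     a = base_attack + atk_modifier
--     if num_hits < 3 or not falloff:
--         return max(a * num_hits, 0)
--     if a <= 0:
--         return 0
--     # hits 0..t-1 deal a - i (>= 2) damage, the remaining num_hits - t hits deal 1 each
--     t = min(num_hits, a - 1)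
--     return t * a - t * (t - 1) // 2 + (num_hits - t)
-- ===== Notes on version B (the rewrite author's own statement) =====
-- stated objective: faster
-- what changed: Replaces the per-hit falloff loop with a closed-form arithmetic-series sum: t = min(num_hits, a-1) hits contribute a, a-1, ..., summed as t*a - t*(t-1)//2, and the remaining hits contribute 1 each.
import Mathlib
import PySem

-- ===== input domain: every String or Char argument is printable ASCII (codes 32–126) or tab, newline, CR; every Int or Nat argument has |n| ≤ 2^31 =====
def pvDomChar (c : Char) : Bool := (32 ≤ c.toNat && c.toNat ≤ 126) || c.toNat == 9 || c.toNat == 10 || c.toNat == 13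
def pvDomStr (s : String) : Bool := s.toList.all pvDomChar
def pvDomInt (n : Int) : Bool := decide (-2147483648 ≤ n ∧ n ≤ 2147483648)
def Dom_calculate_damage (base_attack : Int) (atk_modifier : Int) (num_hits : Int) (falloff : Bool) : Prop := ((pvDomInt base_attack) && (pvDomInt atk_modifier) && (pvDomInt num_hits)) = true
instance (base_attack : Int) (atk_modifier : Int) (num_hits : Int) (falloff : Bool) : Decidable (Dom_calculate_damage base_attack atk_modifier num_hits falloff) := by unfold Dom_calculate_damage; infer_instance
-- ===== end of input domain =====

-- B replaces A's per-hit falloff loop by a closed-form arithmetic-series sum (O(1) instead of O(num_hits)).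

-- ===== PORT A =====
-- the 'for i in range(num_hits)' loop of A: state = total_damage; 'break' returns the accumulated total
def pvLoopA (a : Int) : List Int → Int → Int
  | [], total => total
  | i :: rest, total =>
    if a ≤ 0 then total            -- break: initial_hit <= 0
    else
      let d := a - i
      let d := if d ≤ 0 then 1 else d
      pvLoopA a rest (total + d)

def calculate_damage (base_attack : Int) (atk_modifier : Int) (num_hits : Int) (falloff : Bool) : Int :=
  if num_hits < 3 ∨ falloff = false then
    let total_damage := (base_attack + atk_modifier) * num_hits
    if total_damage < 0 then 0 else total_damage
  else
    pvLoopA (base_attack + atk_modifier) (PySem.List.pyRange 0 num_hits 1) 0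

-- ===== PORT B =====
def calculate_damage_alt (base_attack : Int) (atk_modifier : Int) (num_hits : Int) (falloff : Bool) : Int :=
  let a := base_attack + atk_modifier
  if num_hits < 3 ∨ falloff = false then max (a * num_hits) 0
  else if a ≤ 0 then 0
  else
    let t := min num_hits (a - 1)
    t * a - PySem.Int.floordiv (t * (t - 1)) 2 + (num_hits - t)

-- ===== PRECONDITION & SPEC =====
def Spec_calculate_damage (base_attack : Int) (atk_modifier : Int) (num_hits : Int) (falloff : Bool) (out : Int) : Prop := out = calculate_damage_alt base_attack atk_modifier num_hits falloff
instance (base_attack : Int) (atk_modifier : Int) (num_hits : Int) (falloff : Bool) (out : Int) : Decidable (Spec_calculate_damage base_attack atk_modifier num_hits falloff out) := by unfold Spec_calculate_damage; infer_instance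

-- ===== CLAIM (what is proved, stated in full; the proofs are below) =====
def Claim_equal_calculate_damage : Prop := ∀ (base_attack : Int) (atk_modifier : Int) (num_hits : Int) (falloff : Bool), Dom_calculate_damage base_attack atk_modifier num_hits falloff → Spec_calculate_damage base_attack atk_modifier num_hits falloff (calculate_damage base_attack atk_modifier num_hits falloff)

-- ===== LEMMAS AND PROOFS =====

lemma pvLoopA_append (a : Int) (ha : 0 < a) (l : List Int) (x t : Int) :
    pvLoopA a (l ++ [x]) t = pvLoopA a l t + (if a - x ≤ 0 then 1 else a - x) := by
  induction l generalizing t with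
  | nil => simp [pvLoopA, not_le.mpr ha]
  | cons i rest ih => simp [pvLoopA, not_le.mpr ha, ih]

lemma pvFloordiv_step (j : Int) :
    PySem.Int.floordiv ((j + 1) * j) 2 = PySem.Int.floordiv (j * (j - 1)) 2 + j := by
  obtain ⟨c, hc⟩ : Even (j * (j - 1)) := by
    have := Int.even_mul_succ_self (j - 1)
    simpa [mul_comm] using this
  have h1 : j * (j - 1) = 2 * c := by omega
  have h2 : (j + 1) * j = 2 * (c + j) := by nlinarith
  rw [h1, h2, PySem.Int.floordiv_eq_ediv_of_pos (by omega),
      PySem.Int.floordiv_eq_ediv_of_pos (by omega),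
      Int.mul_ediv_cancel_left _ (by omega), Int.mul_ediv_cancel_left _ (by omega)]

lemma pvKey (a : Int) (ha : 0 < a) (k : Nat) :
    pvLoopA a (PySem.List.pyRange 0 (k : Int) 1) 0 =
      min (k : Int) (a - 1) * a
        - PySem.Int.floordiv (min (k : Int) (a - 1) * (min (k : Int) (a - 1) - 1)) 2
        + ((k : Int) - min (k : Int) (a - 1)) := by
  induction k with
  | zero =>
    rw [PySem.List.pyRange_one_eq_nil (by omega)]
    have h0 : min (0 : Int) (a - 1) = 0 := by omega
    simp [pvLoopA, h0]
  | succ k ih =>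
    have hcast : ((k + 1 : Nat) : Int) = (k : Int) + 1 := by push_cast; ring
    rw [hcast, PySem.List.pyRange_one_succ_right (by omega),
        pvLoopA_append a ha _ _ _, ih]
    by_cases h : (k : Int) < a - 1
    · have ht : min (k : Int) (a - 1) = k := by omega
      have ht' : min ((k : Int) + 1) (a - 1) = (k : Int) + 1 := by omega
      have hif : (if a - (k : Int) ≤ 0 then (1 : Int) else a - k) = a - k := by
        rw [if_neg (by omega)]
      rw [ht, ht', hif]
      have e1 : ((k : Int) + 1) * ((k : Int) + 1 - 1) = ((k : Int) + 1) * (k : Int) := by ring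
      rw [e1, pvFloordiv_step (k : Int)]
      ring
    · have ht : min (k : Int) (a - 1) = a - 1 := by omega
      have ht' : min ((k : Int) + 1) (a - 1) = a - 1 := by omega
      have hif : (if a - (k : Int) ≤ 0 then (1 : Int) else a - k) = 1 := by
        by_cases h2 : a - (k : Int) ≤ 0
        · rw [if_pos h2]
        · rw [if_neg h2]; omega
      rw [ht, ht', hif]; ring

-- ===== VERDICT (by name: the statement is the Claim_ definition above) =====
theorem calculate_damage_spec : Claim_equal_calculate_damage := by
  intro b m n f _
  unfold Spec_calculate_damage calculate_damage calculate_damage_alt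
  by_cases hbr : n < 3 ∨ f = false
  · simp only [if_pos hbr]
    omega
  · simp only [if_neg hbr]
    have hn3 : 3 ≤ n := by
      rcases not_or.mp hbr with ⟨h1, _⟩; omega
    by_cases ha : b + m ≤ 0
    · rw [if_pos ha, PySem.List.pyRange_one_cons (by omega)]
      simp [pvLoopA, ha]
    · rw [if_neg ha]
      have ha' : 0 < b + m := by omega
      have hcast : ((n.toNat : Int)) = n := Int.toNat_of_nonneg (by omega)
      calc pvLoopA (b + m) (PySem.List.pyRange 0 n 1) 0
          = pvLoopA (b + m) (PySem.List.pyRange 0 (n.toNat : Int) 1) 0 := by rw [hcast]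
        _ = _ := by rw [pvKey (b + m) ha' n.toNat]; rw [hcast]
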